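-- pv_equiv track=rewrite | github.com/RayMEI-XiaoGaoShou/Unreleased_Game_Research_SKILL | unreleased-game-research/scripts/annotate_section_4_claims.py | build_topic_consensus_rows
-- ===== SOURCE A (Python) =====
-- def build_topic_consensus_rows(claim_rows: list[dict[str, str]]) -> list[dict[str, str]]:
--     grouped: dict[str, list[dict[str, str]]] = {}
--     for row in claim_rows:
--         grouped.setdefault(row.get("topic_label", "gameplay loop"), []).append(row)
--
--     consensus_rows: list[dict[str, str]] = []
--     for topic_label, rows in sorted(grouped.items()):
--         positive_videos = {row.get("video_id", "") for row in rows if row.get("supports_positive_or_negative") == "positive"}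
--         negative_videos = {row.get("video_id", "") for row in rows if row.get("supports_positive_or_negative") == "negative"}
--         mixed_videos = {row.get("video_id", "") for row in rows if row.get("supports_positive_or_negative") in {"mixed", "neutral"}}
--         participating_videos = positive_videos | negative_videos | mixed_videos
--         if len(participating_videos) < 2:
--             consensus_type = "weak_signal"
--         elif len(positive_videos) >= 2 and not negative_videos and not mixed_videos:
--             consensus_type = "consensus_positive"
--         elif len(negative_videos) >= 2 and not positive_videos and not mixed_videos:
--             consensus_type = "consensus_negative"
--         elif positive_videos and negative_videos:
--             consensus_type = "mixed"
--         else: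
--             consensus_type = "weak_signal"
--
--         supporting_video_count = len(participating_videos)
--         contradicting_video_count = min(len(positive_videos), len(negative_videos)) if positive_videos and negative_videos else 0
--         confidence_level = "high" if supporting_video_count >= 3 and contradicting_video_count == 0 else "medium" if supporting_video_count >= 2 else "low"
--         representative_claim_ids = "; ".join(row.get("claim_id", "") for row in rows[:3])
--         consensus_rows.append(
--             {
--                 "topic_label": topic_label,
--                 "consensus_type": consensus_type,
--                 "supporting_video_count": str(supporting_video_count),
--                 "contradicting_video_count": str(contradicting_video_count),
--                 "representative_claim_ids": representative_claim_ids,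
--                 "confidence_level": confidence_level,
--             }
--         )
--     return consensus_rows
-- ===== SOURCE B (Python) =====
-- def build_topic_consensus_rows(claim_rows: list[dict[str, str]]) -> list[dict[str, str]]:
--     # Single pass: per topic keep three video-id sets and the first up-to-3 claim_ids.
--     acc: dict[str, tuple[set, set, set, list]] = {}
--     for row in claim_rows:
--         topic = row.get("topic_label", "gameplay loop")
--         st = acc.get(topic)
--         if st is None:
--             st = (set(), set(), set(), [])
--             acc[topic] = st
--         pos, neg, mix, cids = st
--         if len(cids) < 3:
--             cids.append(row.get("claim_id", ""))
--         s = row.get("supports_positive_or_negative")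
--         if s == "positive":
--             pos.add(row.get("video_id", ""))
--         elif s == "negative":
--             neg.add(row.get("video_id", ""))
--         elif s == "mixed" or s == "neutral":
--             mix.add(row.get("video_id", ""))
--     out: list[dict[str, str]] = []
--     for topic in sorted(acc):
--         pos, neg, mix, cids = acc[topic]
--         supporting = len(pos | neg | mix)
--         contradicting = min(len(pos), len(neg)) if pos and neg else 0
--         if supporting < 2:
--             consensus_type = "weak_signal"
--         elif len(pos) >= 2 and not neg and not mix:
--             consensus_type = "consensus_positive"
--         elif len(neg) >= 2 and not pos and not mix:
--             consensus_type = "consensus_negative"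
--         elif pos and neg:
--             consensus_type = "mixed"
--         else:
--             consensus_type = "weak_signal"
--         confidence = "high" if supporting >= 3 and contradicting == 0 else "medium" if supporting >= 2 else "low"
--         out.append(
--             {
--                 "topic_label": topic,
--                 "consensus_type": consensus_type,
--                 "supporting_video_count": str(supporting),
--                 "contradicting_video_count": str(contradicting),
--                 "representative_claim_ids": "; ".join(cids),
--                 "confidence_level": confidence,
--             }
--         )
--     return out
-- ===== Notes on version B (the rewrite author's own statement) =====
-- stated objective: alternative
-- what changed: B replaces A's group-rows-per-topic-then-three-filter-scans structure by a single streaming pass that classifies each row once into per-topic accumulators (three video-id sets plus the first up-to-3 claim_ids), then emits the summary rows over the sorted topic keys.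
import Mathlib
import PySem

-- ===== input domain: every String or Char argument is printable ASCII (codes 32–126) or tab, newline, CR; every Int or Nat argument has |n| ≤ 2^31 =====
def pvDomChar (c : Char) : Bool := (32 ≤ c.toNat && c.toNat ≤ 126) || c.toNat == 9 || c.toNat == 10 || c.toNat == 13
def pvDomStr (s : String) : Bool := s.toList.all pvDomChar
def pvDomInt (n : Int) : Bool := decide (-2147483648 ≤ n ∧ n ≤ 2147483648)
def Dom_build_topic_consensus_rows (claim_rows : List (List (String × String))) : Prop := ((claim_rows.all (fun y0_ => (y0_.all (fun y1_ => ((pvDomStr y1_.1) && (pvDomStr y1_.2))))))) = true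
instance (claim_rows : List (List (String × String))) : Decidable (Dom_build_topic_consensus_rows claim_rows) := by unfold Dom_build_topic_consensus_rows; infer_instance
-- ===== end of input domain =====

-- A groups rows per topic and re-scans each group three times; B does one streaming
-- pass keeping per-topic accumulators (alternative decomposition, same results).


-- ===== PORT A =====
-- row.get(k, dflt) / row.get(k) on a Python dict row (assoc list, first match)
def rowGetD (row : List (String × String)) (k d : String) : String :=
  (PySem.Dict.mk row).getD k d

def rowGet? (row : List (String × String)) (k : String) : Option String :=
  (PySem.Dict.mk row).get? k

def btTopic (row : List (String × String)) : String :=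
  rowGetD row "topic_label" "gameplay loop"

def btVid (row : List (String × String)) : String := rowGetD row "video_id" ""

def btCid (row : List (String × String)) : String := rowGetD row "claim_id" ""

def btPosP (row : List (String × String)) : Bool :=
  rowGet? row "supports_positive_or_negative" == some "positive"

def btNegP (row : List (String × String)) : Bool :=
  rowGet? row "supports_positive_or_negative" == some "negative"

def btMixP (row : List (String × String)) : Bool :=
  rowGet? row "supports_positive_or_negative" == some "mixed" ||
  rowGet? row "supports_positive_or_negative" == some "neutral"

def build_topic_consensus_rows (claim_rows : List (List (String × String))) : List (List (String × String)) :=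
  -- grouped.setdefault(topic, []).append(row)
  let grouped : PySem.Dict String (List (List (String × String))) :=
    claim_rows.foldl (fun g row => g.modify (btTopic row) [] (· ++ [row])) PySem.Dict.empty
  -- sorted(grouped.items()): keys are distinct, so Python never compares the row
  -- lists; sorting the pairs by their first component is exact.
  (PySem.List.sorted grouped.items (fun p => p.1) false).map (fun p =>
    let topic_label := p.1
    let rows := p.2
    let positive_videos := PySem.Set.ofList ((rows.filter btPosP).map btVid)
    let negative_videos := PySem.Set.ofList ((rows.filter btNegP).map btVid)
    let mixed_videos := PySem.Set.ofList ((rows.filter btMixP).map btVid)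
    let participating := PySem.Set.union (PySem.Set.union positive_videos negative_videos) mixed_videos
    let consensus_type : String :=
      if participating.length < 2 then "weak_signal"
      else if 2 ≤ positive_videos.length ∧ negative_videos = [] ∧ mixed_videos = [] then "consensus_positive"
      else if 2 ≤ negative_videos.length ∧ positive_videos = [] ∧ mixed_videos = [] then "consensus_negative"
      else if positive_videos ≠ [] ∧ negative_videos ≠ [] then "mixed"
      else "weak_signal"
    let supporting := participating.length
    let contradicting := if positive_videos ≠ [] ∧ negative_videos ≠ [] then min positive_videos.length negative_videos.length else 0
    let confidence : String :=
      if 3 ≤ supporting ∧ contradicting = 0 then "high"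
      else if 2 ≤ supporting then "medium" else "low"
    -- rows[:3] on a list with a nonnegative literal bound is take 3 (exact)
    let rep := PySem.Str.join "; " ((rows.take 3).map btCid)
    [("topic_label", topic_label), ("consensus_type", consensus_type),
     ("supporting_video_count", PySem.Int.toStr (supporting : Int)),
     ("contradicting_video_count", PySem.Int.toStr (contradicting : Int)),
     ("representative_claim_ids", rep), ("confidence_level", confidence)])

-- ===== PORT B =====
-- per-topic accumulator: (positive set, negative set, mixed/neutral set, first ≤3 claim_ids)
def btStep (a : PySem.Set String × PySem.Set String × PySem.Set String × List String)
    (row : List (String × String)) :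
    PySem.Set String × PySem.Set String × PySem.Set String × List String :=
  let cids := if a.2.2.2.length < 3 then a.2.2.2 ++ [btCid row] else a.2.2.2
  if btPosP row then (PySem.Set.add a.1 (btVid row), a.2.1, a.2.2.1, cids)
  else if btNegP row then (a.1, PySem.Set.add a.2.1 (btVid row), a.2.2.1, cids)
  else if btMixP row then (a.1, a.2.1, PySem.Set.add a.2.2.1 (btVid row), cids)
  else (a.1, a.2.1, a.2.2.1, cids)

def btFinish (topic : String)
    (a : PySem.Set String × PySem.Set String × PySem.Set String × List String) :
    List (String × String) :=
  let pos := a.1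
  let neg := a.2.1
  let mix := a.2.2.1
  let cids := a.2.2.2
  let supporting := (PySem.Set.union (PySem.Set.union pos neg) mix).length
  let contradicting := if pos ≠ [] ∧ neg ≠ [] then min pos.length neg.length else 0
  let consensus_type : String :=
    if supporting < 2 then "weak_signal"
    else if 2 ≤ pos.length ∧ neg = [] ∧ mix = [] then "consensus_positive"
    else if 2 ≤ neg.length ∧ pos = [] ∧ mix = [] then "consensus_negative"
    else if pos ≠ [] ∧ neg ≠ [] then "mixed"
    else "weak_signal"
  let confidence : String :=
    if 3 ≤ supporting ∧ contradicting = 0 then "high"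
    else if 2 ≤ supporting then "medium" else "low"
  [("topic_label", topic), ("consensus_type", consensus_type),
   ("supporting_video_count", PySem.Int.toStr (supporting : Int)),
   ("contradicting_video_count", PySem.Int.toStr (contradicting : Int)),
   ("representative_claim_ids", PySem.Str.join "; " cids), ("confidence_level", confidence)]

def build_topic_consensus_rows_alt (claim_rows : List (List (String × String))) : List (List (String × String)) :=
  let acc : PySem.Dict String (PySem.Set String × PySem.Set String × PySem.Set String × List String) :=
    claim_rows.foldl
      (fun d row => d.modify (btTopic row) ([], [], [], []) (fun a => btStep a row))
      PySem.Dict.empty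
  (PySem.List.sorted acc.keys (fun t => t) false).map
    (fun t => btFinish t (acc.getD t ([], [], [], [])))

-- ===== PRECONDITION & SPEC =====
def Spec_build_topic_consensus_rows (claim_rows : List (List (String × String))) (out : List (List (String × String))) : Prop := out = build_topic_consensus_rows_alt claim_rows
instance (claim_rows : List (List (String × String))) (out : List (List (String × String))) : Decidable (Spec_build_topic_consensus_rows claim_rows out) := by unfold Spec_build_topic_consensus_rows; infer_instance

-- ===== CLAIM (what is proved, stated in full; the proofs are below) =====
def Claim_equal_build_topic_consensus_rows : Prop := ∀ (claim_rows : List (List (String × String))), Dom_build_topic_consensus_rows claim_rows → Spec_build_topic_consensus_rows claim_rows (build_topic_consensus_rows claim_rows)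

-- ===== LEMMAS AND PROOFS =====

-- summarising a topic's row list in one fold
def btF (rows : List (List (String × String))) :
    PySem.Set String × PySem.Set String × PySem.Set String × List String :=
  rows.foldl btStep ([], [], [], [])

-- map btF over a dict's values
def btMapVal (d : PySem.Dict String (List (List (String × String)))) :
    PySem.Dict String (PySem.Set String × PySem.Set String × PySem.Set String × List String) :=
  PySem.Dict.mk (d.items.map (fun p => (p.1, btF p.2)))

theorem find?_map_val {k n n' : Type} [BEq k] (F : n -> n') (x : k) (l : List (k × n)) :
    List.find? (fun p => p.1 == x) (l.map (fun p => (p.1, F p.2))) =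
      (List.find? (fun p => p.1 == x) l).map (fun p => (p.1, F p.2)) := by
  induction l with
  | nil => rfl
  | cons a l ih => cases h : (a.1 == x) <;> simp [h, ih]

theorem get?_btMapVal (d : PySem.Dict String (List (List (String × String)))) (x : String) :
    (btMapVal d).get? x = (d.get? x).map btF := by
  simp only [PySem.Dict.get?, btMapVal, find?_map_val]
  cases List.find? (fun p => p.1 == x) d.items <;> rfl

theorem contains_btMapVal (d : PySem.Dict String (List (List (String × String)))) (x : String) :
    (btMapVal d).contains x = d.contains x := by
  simp [PySem.Dict.contains, btMapVal, List.any_map, Function.comp_def]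

theorem insert_btMapVal (d : PySem.Dict String (List (List (String × String)))) (x : String)
    (v : List (List (String × String))) :
    (btMapVal d).insert x (btF v) = btMapVal (d.insert x v) := by
  unfold PySem.Dict.insert
  rw [contains_btMapVal]
  by_cases h : d.contains x = true
  · simp only [h, if_true, btMapVal, List.map_map]
    congr 1
    apply List.map_congr_left
    intro p _
    simp only [Function.comp_apply]
    by_cases hx : (p.1 == x) = true <;> simp [hx]
  · simp [h, btMapVal]

theorem modify_btMapVal (d : PySem.Dict String (List (List (String × String))))
    (row : List (String × String)) :
    (btMapVal d).modify (btTopic row) ([], [], [], []) (fun a => btStep a row) =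
      btMapVal (d.modify (btTopic row) [] (· ++ [row])) := by
  unfold PySem.Dict.modify
  have h1 : btStep ((btMapVal d).getD (btTopic row) ([], [], [], [])) row =
      btF (d.getD (btTopic row) [] ++ [row]) := by
    rw [PySem.Dict.getD, PySem.Dict.getD, get?_btMapVal]
    cases d.get? (btTopic row) <;> simp [btF, List.foldl_append]
  simp only []
  rw [h1]
  exact insert_btMapVal d (btTopic row) (d.getD (btTopic row) [] ++ [row])

theorem acc_eq_btMapVal (claim_rows : List (List (String × String)))
    (d : PySem.Dict String (List (List (String × String)))) :
    claim_rows.foldl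
        (fun d row => d.modify (btTopic row) ([], [], [], []) (fun a => btStep a row))
        (btMapVal d) =
      btMapVal (claim_rows.foldl (fun g row => g.modify (btTopic row) [] (· ++ [row])) d) := by
  induction claim_rows generalizing d with
  | nil => rfl
  | cons r l ih =>
    rw [List.foldl_cons, List.foldl_cons, modify_btMapVal]
    exact ih _

theorem insertBy_map {a k : Type} [LinearOrder k] (f : a -> k) (x : a) (l : List a) :
    PySem.List.insertBy (fun a b => decide (a < b)) (f x) (l.map f) =
      (PySem.List.insertBy (fun a b => decide (f a < f b)) x l).map f := by
  induction l with
  | nil => rfl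
  | cons y l ih => cases h : decide (f x < f y) <;> simp [PySem.List.insertBy, h, ih]

theorem sorted_map_fst {a k : Type} [LinearOrder k] (f : a -> k) (l : List a) :
    PySem.List.sorted (l.map f) (fun t => t) false =
      (PySem.List.sorted l f false).map f := by
  rw [PySem.List.sorted_eq_foldl_insertBy, PySem.List.sorted_eq_foldl_insertBy]
  suffices h : ∀ acc : List a,
      (l.map f).foldl (fun acc x => PySem.List.insertBy (fun a b => decide (a < b)) x acc) (acc.map f) =
        (l.foldl (fun acc x => PySem.List.insertBy (fun a b => decide (f a < f b)) x acc) acc).map f by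
    simpa using h []
  intro acc
  induction l generalizing acc with
  | nil => rfl
  | cons y l ih =>
    rw [List.map_cons, List.foldl_cons, List.foldl_cons, insertBy_map]
    exact ih _

theorem find?_of_mem_nodup {k n : Type} [BEq k] [LawfulBEq k] (l : List (k × n)) (x : k) (v : n)
    (hnd : (l.map (fun p => p.1)).Nodup) (hmem : (x, v) ∈ l) :
    List.find? (fun p => p.1 == x) l = some (x, v) := by
  induction l with
  | nil => simp at hmem
  | cons a l ih =>
    rcases List.mem_cons.mp hmem with heq | hmem'
    · subst heq; simp
    · have hsplit := List.nodup_cons.mp (by rw [List.map_cons] at hnd; exact hnd)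
      have ha : (a.1 == x) = false := by
        have hx : x ∈ l.map (fun p => p.1) := List.mem_map.mpr ⟨(x, v), hmem', rfl⟩
        simp only [beq_eq_false_iff_ne, ne_eq]
        intro h; exact hsplit.1 (h ▸ hx)
      rw [List.find?_cons, ha]
      exact ih hsplit.2 hmem'

theorem get?_of_mem_nodup {k n : Type} [BEq k] [LawfulBEq k] (d : PySem.Dict k n) (x : k) (v : n)
    (hnd : (d.items.map (fun p => p.1)).Nodup) (hmem : (x, v) ∈ d.items) : d.get? x = some v := by
  rw [PySem.Dict.get?, find?_of_mem_nodup d.items x v hnd hmem]; rfl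

-- branch exclusivity of the classification
theorem btPos_not_neg (r : List (String × String)) (h : btPosP r = true) : btNegP r = false := by
  unfold btPosP at h; unfold btNegP
  rw [beq_iff_eq] at h; rw [h]; decide

theorem btPos_not_mix (r : List (String × String)) (h : btPosP r = true) : btMixP r = false := by
  unfold btPosP at h; unfold btMixP
  rw [beq_iff_eq] at h; rw [h]; decide

theorem btNeg_not_mix (r : List (String × String)) (h : btNegP r = true) : btMixP r = false := by
  unfold btNegP at h; unfold btMixP
  rw [beq_iff_eq] at h; rw [h]; decide

-- one btStep is componentwise
theorem btStep_components (a : PySem.Set String × PySem.Set String × PySem.Set String × List String)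
    (r : List (String × String)) :
    btStep a r =
      ((if btPosP r then PySem.Set.add a.1 (btVid r) else a.1),
       (if btNegP r then PySem.Set.add a.2.1 (btVid r) else a.2.1),
       (if btMixP r then PySem.Set.add a.2.2.1 (btVid r) else a.2.2.1),
       (if a.2.2.2.length < 3 then a.2.2.2 ++ [btCid r] else a.2.2.2)) := by
  unfold btStep
  by_cases hp : btPosP r = true
  · simp [hp, btPos_not_neg r hp, btPos_not_mix r hp]
  · by_cases hn : btNegP r = true
    · simp [hp, hn, btNeg_not_mix r hn]
    · by_cases hm : btMixP r = true
      · simp [hp, hn, hm]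
      · simp [hp, hn, hm]

theorem foldl_prod4 {b s1 s2 s3 s4 : Type} (l : List b)
    (f1 : s1 -> b -> s1) (f2 : s2 -> b -> s2) (f3 : s3 -> b -> s3) (f4 : s4 -> b -> s4)
    (p : s1) (n : s2) (m : s3) (c : s4) :
    l.foldl (fun a r => (f1 a.1 r, f2 a.2.1 r, f3 a.2.2.1 r, f4 a.2.2.2 r)) (p, n, m, c) =
      (l.foldl f1 p, l.foldl f2 n, l.foldl f3 m, l.foldl f4 c) := by
  induction l generalizing p n m c with
  | nil => rfl
  | cons r l ih => simp [ih]

theorem foldl_add_filter (q : List (String × String) -> Bool)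
    (f : List (String × String) -> String)
    (l : List (List (String × String))) (s : PySem.Set String) :
    l.foldl (fun s r => if q r then PySem.Set.add s (f r) else s) s =
      ((l.filter q).map f).foldl PySem.Set.add s := by
  induction l generalizing s with
  | nil => rfl
  | cons r l ih => cases h : q r <;> simp [h, ih]

theorem foldl_first3 (l : List (List (String × String))) (c : List String) :
    l.foldl (fun c r => if c.length < 3 then c ++ [btCid r] else c) c =
      c ++ (l.take (3 - c.length)).map btCid := by
  induction l generalizing c with
  | nil => simp
  | cons r l ih =>
    rw [List.foldl_cons]
    by_cases hc : c.length < 3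
    · have h3 : 3 - c.length = (3 - (c ++ [btCid r]).length) + 1 := by
        simp only [List.length_append, List.length_cons, List.length_nil]; omega
      simp only [hc, if_true, ih, h3, List.take_succ_cons, List.map_cons]
      simp
    · have h0 : 3 - c.length = 0 := by omega
      have h0' : (3 - c.length < 3 - c.length + 1) := by omega
      simp only [hc, if_false, ih, h0, List.take_zero, List.map_nil, List.append_nil]

theorem btF_spec (rows : List (List (String × String))) :
    btF rows =
      (PySem.Set.ofList ((rows.filter btPosP).map btVid),
       PySem.Set.ofList ((rows.filter btNegP).map btVid),
       PySem.Set.ofList ((rows.filter btMixP).map btVid),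
       (rows.take 3).map btCid) := by
  unfold btF
  have hstep : btStep = fun a r =>
      ((if btPosP r then PySem.Set.add a.1 (btVid r) else a.1),
       (if btNegP r then PySem.Set.add a.2.1 (btVid r) else a.2.1),
       (if btMixP r then PySem.Set.add a.2.2.1 (btVid r) else a.2.2.1),
       (if a.2.2.2.length < 3 then a.2.2.2 ++ [btCid r] else a.2.2.2)) := by
    funext a r; exact btStep_components a r
  rw [hstep, foldl_prod4 rows
    (fun s r => if btPosP r then PySem.Set.add s (btVid r) else s)
    (fun s r => if btNegP r then PySem.Set.add s (btVid r) else s)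
    (fun s r => if btMixP r then PySem.Set.add s (btVid r) else s)
    (fun c r => if c.length < 3 then c ++ [btCid r] else c) [] [] [] [],
    foldl_add_filter, foldl_add_filter, foldl_add_filter, foldl_first3]
  simp [PySem.Set.ofList_eq_foldl]

-- the keys of A's grouping dict are distinct
theorem grouped_keys_nodup (claim_rows : List (List (String × String))) :
    (((claim_rows.foldl (fun g row => g.modify (btTopic row) [] (· ++ [row]))
        PySem.Dict.empty).items.map (fun p => p.1)).Nodup) := by
  have h := PySem.Dict.keys_foldl_modify_key claim_rows btTopic ([] : List (List (String × String)))
    (fun _ row l => l ++ [row]) PySem.Dict.empty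
  simp only [PySem.Dict.keys] at h
  rw [h]
  rw [show (List.map (fun x : String × List (List (String × String)) => x.1)
      (PySem.Dict.empty : PySem.Dict String (List (List (String × String)))).items) = ([] : List String) from rfl,
    PySem.Set.update_nil_left]
  exact PySem.Set.nodup_ofList _

-- ===== VERDICT (by name: the statement is the Claim_ definition above) =====
theorem build_topic_consensus_rows_spec : Claim_equal_build_topic_consensus_rows := by
  intro claim_rows _
  unfold Spec_build_topic_consensus_rows
  simp only [build_topic_consensus_rows, build_topic_consensus_rows_alt]
  have hacc : claim_rows.foldl
      (fun d row => d.modify (btTopic row) ([], [], [], []) (fun a => btStep a row))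
      PySem.Dict.empty =
      btMapVal (claim_rows.foldl (fun g row => g.modify (btTopic row) [] (· ++ [row])) PySem.Dict.empty) := by
    rw [show (PySem.Dict.empty : PySem.Dict String (PySem.Set String × PySem.Set String × PySem.Set String × List String)) = btMapVal PySem.Dict.empty from rfl]
    exact acc_eq_btMapVal claim_rows PySem.Dict.empty
  rw [hacc]
  set G := claim_rows.foldl (fun g row => g.modify (btTopic row) [] (· ++ [row])) PySem.Dict.empty with hG
  have hkeys : (btMapVal G).keys = G.items.map (fun p => p.1) := by
    simp [PySem.Dict.keys, btMapVal, List.map_map]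
  rw [hkeys, sorted_map_fst (fun p => p.1) G.items, List.map_map]
  symm
  apply List.map_congr_left
  intro p hp
  have hmem : p ∈ G.items := (PySem.List.mem_sorted _ _ _ _).mp hp
  have hget : G.get? p.1 = some p.2 :=
    get?_of_mem_nodup G p.1 p.2 (grouped_keys_nodup claim_rows) (by simpa using hmem)
  have hgetD : (btMapVal G).getD p.1 ([], [], [], []) = btF p.2 := by
    rw [PySem.Dict.getD, get?_btMapVal, hget]; rfl
  simp only [Function.comp_apply]
  rw [hgetD, btF_spec]
  rfl
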